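-- pv_equiv track=rewrite | github.com/CubeLander/imonitor | analyzer/msprof_stage_analyzer.py | _merge_intervals_covered_and_span_ns
-- ===== SOURCE A (Python) =====
-- from typing import Dict, Iterable, List, Optional, Sequence, Tuple
--
-- def _merge_intervals_covered_and_span_ns(intervals: Sequence[Tuple[int, int]]) -> Tuple[int, int]:
--     if not intervals:
--         return 0, 0
--     seq = sorted((int(s), int(e)) for s, e in intervals if e > s)
--     if not seq:
--         return 0, 0
--     span_ns = int(seq[-1][1] - seq[0][0])
--     covered_ns = 0
--     cur_s, cur_e = seq[0]
--     for s, e in seq[1:]: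
--         if s <= cur_e:
--             if e > cur_e:
--                 cur_e = e
--             continue
--         covered_ns += cur_e - cur_s
--         cur_s, cur_e = s, e
--     covered_ns += cur_e - cur_s
--     return max(0, covered_ns), max(0, span_ns)
-- ===== SOURCE B (Python) =====
-- def _merge_intervals_covered_and_span_ns(intervals):
--     pairs = [(int(s), int(e)) for s, e in intervals if e > s]
--     if not pairs:
--         return 0, 0
--     events = sorted([(s, 1) for s, e in pairs] + [(e, -1) for s, e in pairs])
--     covered = 0
--     depth = 0
--     prev = 0
--     for pos, delta in events:
--         if depth > 0:
--             covered += pos - prev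
--         depth += delta
--         prev = pos
--     return covered, max(pairs)[1] - min(pairs)[0]
-- ===== Notes on version B (the rewrite author's own statement) =====
-- stated objective: alternative
-- what changed: Covered length is computed by a sweep line: the intervals are turned into (position, +1/-1) start/end events, the events are sorted, and one pass accumulates gap lengths while an active-depth counter is positive, instead of A's sort-the-pairs-then-merge-a-current-interval scan; the span is read off max(pairs)/min(pairs) (which reproduces A's last-sorted-pair convention), and A's defensive max(0, ..) clamps are dropped because the values are provably nonnegative.
import Mathlib
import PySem

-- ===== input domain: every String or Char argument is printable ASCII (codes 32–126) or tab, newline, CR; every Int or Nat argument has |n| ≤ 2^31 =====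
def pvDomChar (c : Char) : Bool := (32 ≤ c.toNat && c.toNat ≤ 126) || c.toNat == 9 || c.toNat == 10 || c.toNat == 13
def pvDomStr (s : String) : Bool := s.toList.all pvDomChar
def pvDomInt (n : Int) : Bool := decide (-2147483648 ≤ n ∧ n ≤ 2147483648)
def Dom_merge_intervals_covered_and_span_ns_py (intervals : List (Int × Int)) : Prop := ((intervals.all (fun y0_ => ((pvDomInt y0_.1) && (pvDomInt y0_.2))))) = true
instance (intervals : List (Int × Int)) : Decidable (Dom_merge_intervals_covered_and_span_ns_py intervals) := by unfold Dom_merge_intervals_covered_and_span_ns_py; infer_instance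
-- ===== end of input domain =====

-- B replaces A's sort-the-pairs-then-merge scan by a sweep line over (position, ±1) start/end
-- events with an active-depth counter, and reads the span off max(pairs)/min(pairs); an
-- alternative algorithm of similar cost, not claimed faster.


-- ===== PORT A =====
-- the body of A's 'for s, e in seq[1:]' loop, state (covered_ns, cur_s, cur_e)
def pvStepA (st : Int × Int × Int) (p : Int × Int) : Int × Int × Int :=
  if p.1 ≤ st.2.2 then
    (if p.2 > st.2.2 then (st.1, st.2.1, p.2) else st)
  else (st.1 + (st.2.2 - st.2.1), p.1, p.2)

def merge_intervals_covered_and_span_ns_py (intervals : List (Int × Int)) : Int × Int :=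
  if intervals = [] then (0, 0)
  else
    -- sorted((int(s), int(e)) for s, e in intervals if e > s); int() on an int is the identity
    match PySem.List.sorted2 (intervals.filter (fun p => decide (p.2 > p.1))) Prod.fst Prod.snd with
    | [] => (0, 0)
    | (s0, e0) :: rest =>
      -- seq[-1][1] - seq[0][0] on the known-nonempty seq
      let span_ns := (((s0, e0) :: rest).getLast (by simp)).2 - s0
      let fin := rest.foldl pvStepA (0, s0, e0)
      (max 0 (fin.1 + (fin.2.2 - fin.2.1)), max 0 span_ns)

-- ===== PORT B =====
-- [(s, 1) for s, e in pairs] + [(e, -1) for s, e in pairs]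
def pvEvts (pairs : List (Int × Int)) : List (Int × Int) :=
  pairs.map (fun p => (p.1, (1 : Int))) ++ pairs.map (fun p => (p.2, (-1 : Int)))

-- the body of B's 'for pos, delta in events' loop, state (covered, depth, prev)
def pvStepE (st : Int × Int × Int) (ev : Int × Int) : Int × Int × Int :=
  ((if st.2.1 > 0 then st.1 + (ev.1 - st.2.2) else st.1), st.2.1 + ev.2, ev.1)

def merge_intervals_covered_and_span_ns_py_alt (intervals : List (Int × Int)) : Int × Int :=
  let pairs := intervals.filter (fun p => decide (p.2 > p.1))
  if pairs = [] then (0, 0)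
  else
    let events := PySem.List.sorted2 (pvEvts pairs) Prod.fst Prod.snd
    let fin := events.foldl pvStepE (0, 0, 0)
    -- max(pairs)[1] - min(pairs)[0]; pairs is nonempty here, so the extrema exist
    match PySem.List.max2? pairs Prod.fst Prod.snd, PySem.List.min2? pairs Prod.fst Prod.snd with
    | some M, some m => (fin.1, M.2 - m.1)
    | _, _ => (0, 0)

-- ===== PRECONDITION & SPEC =====
def Spec_merge_intervals_covered_and_span_ns_py (intervals : List (Int × Int)) (out : Int × Int) : Prop := out = merge_intervals_covered_and_span_ns_py_alt intervals
instance (intervals : List (Int × Int)) (out : Int × Int) : Decidable (Spec_merge_intervals_covered_and_span_ns_py intervals out) := by unfold Spec_merge_intervals_covered_and_span_ns_py; infer_instance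

-- ===== CLAIM (what is proved, stated in full; the proofs are below) =====
def Claim_equal_merge_intervals_covered_and_span_ns_py : Prop := ∀ (intervals : List (Int × Int)), Dom_merge_intervals_covered_and_span_ns_py intervals → Spec_merge_intervals_covered_and_span_ns_py intervals (merge_intervals_covered_and_span_ns_py intervals)

-- ===== LEMMAS AND PROOFS =====

-- Python's lexicographic ≤ on int pairs, the order both sorts and min/max use
def pvLexLe (a b : Int × Int) : Prop := a.1 < b.1 ∨ (a.1 = b.1 ∧ a.2 ≤ b.2)

theorem pv_lexle_iff (a b : Int × Int) : pvLexLe a b ↔ (toLex a : Int ×ₗ Int) ≤ toLex b :=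
  (Prod.Lex.le_iff).symm

theorem pv_lexle_refl (a : Int × Int) : pvLexLe a a := Or.inr ⟨rfl, le_refl _⟩

theorem pv_lexle_trans {a b c : Int × Int} (h1 : pvLexLe a b) (h2 : pvLexLe b c) : pvLexLe a c := by
  unfold pvLexLe at *; omega

theorem pv_lexle_antisymm {a b : Int × Int} (h1 : pvLexLe a b) (h2 : pvLexLe b a) : a = b := by
  unfold pvLexLe at *
  have : a.1 = b.1 ∧ a.2 = b.2 := by omega
  exact Prod.ext this.1 this.2

-- the set of integer unit cells covered by the union of the half-open intervals
noncomputable def pvU (S : List (Int × Int)) : Finset Int :=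
  S.foldr (fun p acc => Finset.Ico p.1 p.2 ∪ acc) ∅

theorem mem_pvU (S : List (Int × Int)) (x : Int) :
    x ∈ pvU S ↔ ∃ p ∈ S, p.1 ≤ x ∧ x < p.2 := by
  induction S with
  | nil => simp [pvU]
  | cons q t ih =>
    simp only [pvU, List.foldr_cons, Finset.mem_union, Finset.mem_Ico]
    rw [show (t.foldr (fun p acc => Finset.Ico p.1 p.2 ∪ acc) ∅) = pvU t from rfl]
    simp [ih]

-- Python's tuple comparison as a boolean equals decide of the lex order
theorem pv_lt2_eq (a b : Int × Int) :
    (decide (a.1 < b.1) || (!decide (b.1 < a.1) && decide (a.2 < b.2)))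
      = decide ((toLex a : Int ×ₗ Int) < toLex b) := by
  rcases lt_trichotomy a.1 b.1 with h | h | h
  · simp [h, Prod.Lex.lt_iff, not_lt.mpr (le_of_lt h)]
  · simp [h, Prod.Lex.lt_iff]
  · simp [h, not_lt.mpr (le_of_lt h), Prod.Lex.lt_iff, ne_of_gt h]

-- sorted2 with keys fst, snd is sorted with the lex key
theorem pv_sorted2_eq_sorted_lex (xs : List (Int × Int)) :
    PySem.List.sorted2 xs Prod.fst Prod.snd =
      PySem.List.sorted xs (fun p => (toLex p : Int ×ₗ Int)) := by
  show List.foldl _ [] xs = List.foldl _ [] xs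
  congr 1
  funext acc x
  congr 1
  funext a b
  exact pv_lt2_eq a b

theorem pv_le_getLast : ∀ (l : List (Int × Int)) (hne : l ≠ []),
    l.Pairwise pvLexLe → ∀ v ∈ l, pvLexLe v (l.getLast hne) := by
  intro l
  induction l with
  | nil => intro hne; cases hne rfl
  | cons a t ih =>
    intro hne hp v hv
    rcases List.pairwise_cons.mp hp with ⟨ha, ht⟩
    by_cases htne : t = []
    · subst htne
      simp only [List.mem_singleton] at hv
      subst hv
      simp only [List.getLast_singleton]
      exact pv_lexle_refl v
    · rw [List.getLast_cons htne]
      rcases List.mem_cons.mp hv with rfl | hv'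
      · exact ha _ (List.getLast_mem htne)
      · exact ih htne ht v hv'

-- lex ≤ implies ≤ on first components
theorem pv_fst_le {a b : Int × Int} (h : pvLexLe a b) : a.1 ≤ b.1 := by
  unfold pvLexLe at h; omega

-- ===== A-side: the merge fold computes the measure of the union =====
theorem pv_mergeA (rest : List (Int × Int)) :
    ∀ (cov cs ce : Int), cs < ce →
      (∀ p ∈ rest, p.1 < p.2) →
      (∀ p ∈ rest, cs ≤ p.1) →
      rest.Pairwise (fun a b => a.1 ≤ b.1) →
      (rest.foldl pvStepA (cov, cs, ce)).1 +
        ((rest.foldl pvStepA (cov, cs, ce)).2.2 - (rest.foldl pvStepA (cov, cs, ce)).2.1)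
        = cov + (((Finset.Ico cs ce ∪ pvU rest).card : Nat) : Int) := by
  induction rest with
  | nil =>
    intro cov cs ce hlt _ _ _
    simp only [List.foldl_nil, pvU, List.foldr_nil, Finset.union_empty, Int.card_Ico]
    omega
  | cons q t ih =>
    intro cov cs ce hlt hall hge hpair
    obtain ⟨s, e⟩ := q
    have hse : s < e := hall (s, e) (List.mem_cons_self ..)
    have hcs : cs ≤ s := hge (s, e) (List.mem_cons_self ..)
    have ht : ∀ p ∈ t, p.1 < p.2 := fun p hp => hall p (List.mem_cons_of_mem _ hp)
    have hts : ∀ p ∈ t, s ≤ p.1 := fun p hp => (List.pairwise_cons.mp hpair).1 p hp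
    have htp : t.Pairwise (fun a b => a.1 ≤ b.1) := (List.pairwise_cons.mp hpair).2
    have hUc : pvU ((s, e) :: t) = Finset.Ico s e ∪ pvU t := rfl
    simp only [List.foldl_cons, hUc]
    by_cases hs : s ≤ ce
    · by_cases he : ce < e
      · have hstep : pvStepA (cov, cs, ce) (s, e) = (cov, cs, e) := by
          simp [pvStepA, hs, he]
        rw [hstep, ih cov cs e (lt_trans hlt he) ht
          (fun p hp => hge p (List.mem_cons_of_mem _ hp)) htp]
        have hun : Finset.Ico cs ce ∪ (Finset.Ico s e ∪ pvU t) = Finset.Ico cs e ∪ pvU t := by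
          ext x
          by_cases hx : x ∈ pvU t
          · simp [Finset.mem_union, Finset.mem_Ico, hx]
          · simp only [Finset.mem_union, Finset.mem_Ico, hx, or_false]
            omega
        rw [hun]
      · have he' : e ≤ ce := not_lt.mp he
        have hstep : pvStepA (cov, cs, ce) (s, e) = (cov, cs, ce) := by
          simp [pvStepA, hs, not_lt.mpr he']
        rw [hstep, ih cov cs ce hlt ht (fun p hp => hge p (List.mem_cons_of_mem _ hp)) htp]
        have hun : Finset.Ico cs ce ∪ (Finset.Ico s e ∪ pvU t) = Finset.Ico cs ce ∪ pvU t := by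
          ext x
          by_cases hx : x ∈ pvU t
          · simp [Finset.mem_union, Finset.mem_Ico, hx]
          · simp only [Finset.mem_union, Finset.mem_Ico, hx, or_false]
            omega
        rw [hun]
    · have hs' : ce < s := not_le.mp hs
      have hstep : pvStepA (cov, cs, ce) (s, e) = (cov + (ce - cs), s, e) := by
        simp [pvStepA, hs]
      rw [hstep, ih (cov + (ce - cs)) s e hse ht hts htp]
      have hdisj : Disjoint (Finset.Ico cs ce) (Finset.Ico s e ∪ pvU t) := by
        rw [Finset.disjoint_left]
        intro x hx hx'
        simp only [Finset.mem_Ico] at hx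
        rcases Finset.mem_union.mp hx' with h | h
        · simp only [Finset.mem_Ico] at h; omega
        · obtain ⟨p, hp, hp1, hp2⟩ := (mem_pvU t x).mp h
          have := hts p hp
          omega
      rw [Finset.card_union_of_disjoint hdisj, Int.card_Ico]
      push_cast
      omega

-- ===== B-side: counting helpers =====
theorem pv_evts_starts (S : List (Int × Int)) (prev : Int) :
    (pvEvts S).countP (fun v => decide (v.2 = 1) && decide (v.1 ≤ prev))
      = S.countP (fun p => decide (p.1 ≤ prev)) := by
  unfold pvEvts
  rw [List.countP_append, List.countP_map, List.countP_map]
  simp [Function.comp_def]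

theorem pv_evts_ends (S : List (Int × Int)) (prev : Int) :
    (pvEvts S).countP (fun v => decide (v.2 = -1) && decide (v.1 ≤ prev))
      = S.countP (fun p => decide (p.2 ≤ prev)) := by
  unfold pvEvts
  rw [List.countP_append, List.countP_map, List.countP_map]
  simp [Function.comp_def]

theorem pv_count_split (S : List (Int × Int)) (prev : Int) (hS : ∀ p ∈ S, p.1 < p.2) :
    S.countP (fun p => decide (p.1 ≤ prev))
      = S.countP (fun p => decide (p.2 ≤ prev))
        + S.countP (fun p => decide (p.1 ≤ prev) && decide (prev < p.2)) := by
  induction S with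
  | nil => simp
  | cons q t ih =>
    have hq := hS q (List.mem_cons_self ..)
    have ht : ∀ p ∈ t, p.1 < p.2 := fun p hp => hS p (List.mem_cons_of_mem _ hp)
    simp only [List.countP_cons, ih ht, Bool.and_eq_true, decide_eq_true_eq]
    split_ifs <;> omega

-- ===== B-side: the sweep over the sorted events computes the measure of the union =====
theorem pv_sweep (S : List (Int × Int)) (hS : ∀ p ∈ S, p.1 < p.2) :
    ∀ (R P : List (Int × Int)) (cov depth prev : Int),
      (P ++ R).Pairwise pvLexLe →
      (P ++ R).Perm (pvEvts S) →
      ((P = [] ∧ cov = 0 ∧ depth = 0) ∨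
        (∃ hne : P ≠ [],
          (P.getLast hne).1 = prev ∧
          cov = ((((pvU S).filter (fun x => x < prev)).card : Nat) : Int) ∧
          depth = ((P.countP (fun v => decide (v.2 = 1)) : Nat) : Int)
                  - ((P.countP (fun v => decide (v.2 = -1)) : Nat) : Int))) →
      (R.foldl pvStepE (cov, depth, prev)).1 = (((pvU S).card : Nat) : Int) := by
  intro R
  induction R with
  | nil =>
    intro P cov depth prev hsort hperm hP
    simp only [List.foldl_nil]
    rcases hP with ⟨hPnil, hcov, _⟩ | ⟨hne, hlast, hcov, _⟩
    · subst hPnil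
      have hE : pvEvts S = [] := (List.Perm.nil_eq hperm).symm
      have hSnil : S = [] := by
        unfold pvEvts at hE
        rcases List.append_eq_nil_iff.mp hE with ⟨h1, _⟩
        exact List.map_eq_nil_iff.mp h1
      subst hSnil
      simpa [pvU] using hcov
    · rw [hcov]
      congr 2
      apply Finset.filter_true_of_mem
      intro x hxU
      obtain ⟨p, hp, hp1, hp2⟩ := (mem_pvU S x).mp hxU
      have hev : (p.2, -1) ∈ pvEvts S :=
        List.mem_append.mpr (Or.inr (List.mem_map.mpr ⟨p, hp, rfl⟩))
      have hmem : (p.2, -1) ∈ P := by simpa using hperm.mem_iff.mpr hev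
      have hle := pv_fst_le (pv_le_getLast P hne (by simpa using hsort) _ hmem)
      rw [hlast] at hle
      simp only at hle
      omega
  | cons ev R' ih =>
    obtain ⟨pos, d⟩ := ev
    intro P cov depth prev hsort hperm hP
    simp only [List.foldl_cons]
    have hstep : pvStepE (cov, depth, prev) (pos, d)
        = ((if depth > 0 then cov + (pos - prev) else cov), depth + d, pos) := rfl
    rw [hstep]
    have hmemev : (pos, d) ∈ pvEvts S :=
      hperm.subset (List.mem_append.mpr (Or.inr (List.mem_cons_self ..)))
    have hd : d = 1 ∨ d = -1 := by
      rcases List.mem_append.mp hmemev with h | h <;> obtain ⟨p, _, hpe⟩ := List.mem_map.mp h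
      · exact Or.inl (Prod.ext_iff.mp hpe).2.symm
      · exact Or.inr (Prod.ext_iff.mp hpe).2.symm
    have hshift : (P ++ [(pos, d)]) ++ R' = P ++ (pos, d) :: R' := by simp
    have hPR : ((pos, d) :: R').Pairwise pvLexLe := (List.pairwise_append.mp hsort).2.1
    have hRge : ∀ v ∈ (pos, d) :: R', pos ≤ v.1 := by
      intro v hv
      rcases List.mem_cons.mp hv with rfl | hv'
      · exact le_refl _
      · exact pv_fst_le ((List.pairwise_cons.mp hPR).1 v hv')
    have hcnt1 : ((P ++ [(pos, d)]).countP (fun v => decide (v.2 = 1)) : Int)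
        = (P.countP (fun v => decide (v.2 = 1)) : Int) + (if d = 1 then 1 else 0) := by
      rw [List.countP_append]
      simp [List.countP_cons]
    have hcnt2 : ((P ++ [(pos, d)]).countP (fun v => decide (v.2 = -1)) : Int)
        = (P.countP (fun v => decide (v.2 = -1)) : Int) + (if d = -1 then 1 else 0) := by
      rw [List.countP_append]
      simp [List.countP_cons]
    apply ih (P ++ [(pos, d)]) _ _ pos (by rw [hshift]; exact hsort) (by rw [hshift]; exact hperm)
    right
    refine ⟨by simp, ?_, ?_, ?_⟩
    · simp
    · -- the covered accumulator after this event is the measure below pos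
      rcases hP with ⟨hPnil, hcov, hdep⟩ | ⟨hne, hlast, hcov, hdep⟩
      · subst hPnil
        rw [hdep, if_neg (by omega), hcov]
        have hempty : (pvU S).filter (fun x => x < pos) = ∅ := by
          rw [Finset.filter_eq_empty_iff]
          intro x hxU
          obtain ⟨p, hp, hp1, hp2⟩ := (mem_pvU S x).mp hxU
          have hev : (p.1, 1) ∈ pvEvts S :=
            List.mem_append.mpr (Or.inl (List.mem_map.mpr ⟨p, hp, rfl⟩))
          have hmem : (p.1, 1) ∈ (pos, d) :: R' := by simpa using hperm.mem_iff.mpr hev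
          have := hRge _ hmem
          simp only at this
          omega
        rw [hempty]
        simp
      · have hPP : P.Pairwise pvLexLe := (List.pairwise_append.mp hsort).1
        have hPle : ∀ v ∈ P, v.1 ≤ prev := by
          intro v hv
          have := pv_fst_le (pv_le_getLast P hne hPP v hv)
          rw [hlast] at this
          exact this
        have hprevpos : prev ≤ pos := by
          have := (List.pairwise_append.mp hsort).2.2 _ (List.getLast_mem hne)
            _ (List.mem_cons_self ..)
          have := pv_fst_le this
          rw [hlast] at this
          exact this
        by_cases hlt : prev < pos
        · have hcntP1 : P.countP (fun v => decide (v.2 = 1))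
              = S.countP (fun p => decide (p.1 ≤ prev)) := by
            have e1 : P.countP (fun v => decide (v.2 = 1))
                = P.countP (fun v => decide (v.2 = 1) && decide (v.1 ≤ prev)) :=
              List.countP_congr (fun v hv => by simp [hPle v hv])
            have e2 := hperm.countP_eq (fun v => decide (v.2 = 1) && decide (v.1 ≤ prev))
            rw [List.countP_append] at e2
            have e3 : ((pos, d) :: R').countP (fun v => decide (v.2 = 1) && decide (v.1 ≤ prev)) = 0 := by
              apply List.countP_eq_zero.mpr
              intro v hv
              have := hRge v hv
              simp only [Bool.and_eq_true, decide_eq_true_eq, not_and]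
              intro _
              omega
            rw [e3, pv_evts_starts S prev] at e2
            omega
          have hcntP2 : P.countP (fun v => decide (v.2 = -1))
              = S.countP (fun p => decide (p.2 ≤ prev)) := by
            have e1 : P.countP (fun v => decide (v.2 = -1))
                = P.countP (fun v => decide (v.2 = -1) && decide (v.1 ≤ prev)) :=
              List.countP_congr (fun v hv => by simp [hPle v hv])
            have e2 := hperm.countP_eq (fun v => decide (v.2 = -1) && decide (v.1 ≤ prev))
            rw [List.countP_append] at e2
            have e3 : ((pos, d) :: R').countP (fun v => decide (v.2 = -1) && decide (v.1 ≤ prev)) = 0 := by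
              apply List.countP_eq_zero.mpr
              intro v hv
              have := hRge v hv
              simp only [Bool.and_eq_true, decide_eq_true_eq, not_and]
              intro _
              omega
            rw [e3, pv_evts_ends S prev] at e2
            omega
          have hdchar : depth
              = (S.countP (fun p => decide (p.1 ≤ prev) && decide (prev < p.2)) : Int) := by
            rw [hdep, hcntP1, hcntP2, pv_count_split S prev hS]
            push_cast
            ring
          by_cases hdp : depth > 0
          · have hkpos : 0 < S.countP (fun p => decide (p.1 ≤ prev) && decide (prev < p.2)) := by
              omega
            obtain ⟨p, hp, hpb⟩ := List.countP_pos_iff.mp hkpos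
            simp only [Bool.and_eq_true, decide_eq_true_eq] at hpb
            obtain ⟨hp1, hp2⟩ := hpb
            have hp2pos : pos ≤ p.2 := by
              have hev : (p.2, -1) ∈ pvEvts S :=
                List.mem_append.mpr (Or.inr (List.mem_map.mpr ⟨p, hp, rfl⟩))
              have hmem := hperm.mem_iff.mpr hev
              rcases List.mem_append.mp hmem with h | h
              · have := hPle _ h
                simp only at this
                omega
              · have := hRge _ h
                simpa using this
            have hfe : (pvU S).filter (fun x => x < pos)
                = (pvU S).filter (fun x => x < prev) ∪ Finset.Ico prev pos := by
              ext x
              simp only [Finset.mem_union, Finset.mem_filter, Finset.mem_Ico]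
              by_cases hxU : x ∈ pvU S
              · simp only [hxU, true_and]
                omega
              · constructor
                · intro h
                  exact absurd h.1 hxU
                · rintro (h | ⟨h1, h2⟩)
                  · exact absurd h.1 hxU
                  · exact absurd ((mem_pvU S x).mpr ⟨p, hp, by omega, by omega⟩) hxU
            have hdisj : Disjoint ((pvU S).filter (fun x => x < prev)) (Finset.Ico prev pos) := by
              rw [Finset.disjoint_left]
              intro x hx hx'
              simp only [Finset.mem_filter] at hx
              simp only [Finset.mem_Ico] at hx'
              omega
            rw [if_pos hdp, hfe, Finset.card_union_of_disjoint hdisj, Int.card_Ico, hcov]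
            push_cast
            omega
          · have hk0 : S.countP (fun p => decide (p.1 ≤ prev) && decide (prev < p.2)) = 0 := by
              omega
            have hfe : (pvU S).filter (fun x => x < pos)
                = (pvU S).filter (fun x => x < prev) := by
              ext x
              simp only [Finset.mem_filter]
              constructor
              · rintro ⟨hxU, hxlt⟩
                refine ⟨hxU, ?_⟩
                by_contra hge
                rw [not_lt] at hge
                obtain ⟨p, hp, hp1, hp2⟩ := (mem_pvU S x).mp hxU
                have hp1' : p.1 ≤ prev := by
                  have hev : (p.1, 1) ∈ pvEvts S :=
                    List.mem_append.mpr (Or.inl (List.mem_map.mpr ⟨p, hp, rfl⟩))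
                  have hmem := hperm.mem_iff.mpr hev
                  rcases List.mem_append.mp hmem with h | h
                  · have := hPle _ h
                    simpa using this
                  · have := hRge _ h
                    simp only at this
                    omega
                have : 0 < S.countP (fun p => decide (p.1 ≤ prev) && decide (prev < p.2)) :=
                  List.countP_pos_iff.mpr ⟨p, hp, by
                    simp only [Bool.and_eq_true, decide_eq_true_eq]
                    omega⟩
                omega
              · rintro ⟨hxU, hxlt⟩
                exact ⟨hxU, by omega⟩
            rw [if_neg hdp, hfe]
            exact hcov
        · have hpe : pos = prev := by omega
          subst hpe
          split_ifs with h
          · rw [hcov]; ring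
          · exact hcov
    · -- the depth accumulator is the signed count of processed events
      rcases hP with ⟨hPnil, hcov, hdep⟩ | ⟨hne, hlast, hcov, hdep⟩ <;>
        [subst hPnil; skip] <;>
        rw [hcnt1, hcnt2, hdep] <;>
        rcases hd with rfl | rfl <;> simp <;> omega

-- ===== min/max of pairs: first lex-extremal element =====
def pvMinStep (acc : Option (Int × Int)) (y : Int × Int) : Option (Int × Int) :=
  match acc with
  | none => some y
  | some m => if (decide (y.1 < m.1) || (!decide (m.1 < y.1) && decide (y.2 < m.2))) = true
              then some y else some m

def pvMaxStep (acc : Option (Int × Int)) (y : Int × Int) : Option (Int × Int) :=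
  match acc with
  | none => some y
  | some m => if (decide (m.1 < y.1) || (!decide (y.1 < m.1) && decide (m.2 < y.2))) = true
              then some y else some m

theorem pv_min2_eq_foldl (xs : List (Int × Int)) :
    PySem.List.min2? xs Prod.fst Prod.snd = xs.foldl pvMinStep none := by
  unfold PySem.List.min2? pvMinStep
  congr 1
  funext acc x
  cases acc <;> rfl

theorem pv_max2_eq_foldl (xs : List (Int × Int)) :
    PySem.List.max2? xs Prod.fst Prod.snd = xs.foldl pvMaxStep none := by
  unfold PySem.List.max2? pvMaxStep
  congr 1
  funext acc x
  cases acc <;> rfl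

theorem pv_min2_aux : ∀ (t : List (Int × Int)) (x : Int × Int),
    ∃ m, t.foldl pvMinStep (some x) = some m ∧ m ∈ x :: t ∧ ∀ z ∈ x :: t, pvLexLe m z := by
  intro t
  induction t with
  | nil =>
    intro x
    refine ⟨x, rfl, List.mem_cons_self .., ?_⟩
    intro z hz
    simp only [List.mem_singleton] at hz
    subst hz
    exact pv_lexle_refl z
  | cons y t ih =>
    intro x
    rw [List.foldl_cons]
    have hred : pvMinStep (some x) y =
        if (decide (y.1 < x.1) || (!decide (x.1 < y.1) && decide (y.2 < x.2))) = true
        then some y else some x := rfl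
    rw [hred, pv_lt2_eq y x]
    by_cases hlt : (toLex y : Int ×ₗ Int) < toLex x
    · rw [if_pos (by simpa using hlt)]
      obtain ⟨m, hm, hmem, hall⟩ := ih y
      refine ⟨m, hm, ?_, ?_⟩
      · exact List.mem_cons_of_mem _ hmem
      · intro z hz
        rcases List.mem_cons.mp hz with rfl | hz'
        · exact pv_lexle_trans (hall y (List.mem_cons_self ..))
            ((pv_lexle_iff y z).mpr (le_of_lt hlt))
        · exact hall z hz'
    · rw [if_neg (by simpa using hlt)]
      obtain ⟨m, hm, hmem, hall⟩ := ih x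
      refine ⟨m, hm, ?_, ?_⟩
      · rcases List.mem_cons.mp hmem with rfl | h
        · exact List.mem_cons_self ..
        · exact List.mem_cons_of_mem _ (List.mem_cons_of_mem _ h)
      · intro z hz
        rcases List.mem_cons.mp hz with rfl | hz'
        · exact hall _ (List.mem_cons_self ..)
        · rcases List.mem_cons.mp hz' with rfl | hz''
          · exact pv_lexle_trans (hall x (List.mem_cons_self ..))
              ((pv_lexle_iff x z).mpr (not_lt.mp hlt))
          · exact hall z (List.mem_cons_of_mem _ hz'')

theorem pv_max2_aux : ∀ (t : List (Int × Int)) (x : Int × Int),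
    ∃ m, t.foldl pvMaxStep (some x) = some m ∧ m ∈ x :: t ∧ ∀ z ∈ x :: t, pvLexLe z m := by
  intro t
  induction t with
  | nil =>
    intro x
    refine ⟨x, rfl, List.mem_cons_self .., ?_⟩
    intro z hz
    simp only [List.mem_singleton] at hz
    subst hz
    exact pv_lexle_refl z
  | cons y t ih =>
    intro x
    rw [List.foldl_cons]
    have hred : pvMaxStep (some x) y =
        if (decide (x.1 < y.1) || (!decide (y.1 < x.1) && decide (x.2 < y.2))) = true
        then some y else some x := rfl
    rw [hred, pv_lt2_eq x y]
    by_cases hlt : (toLex x : Int ×ₗ Int) < toLex y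
    · rw [if_pos (by simpa using hlt)]
      obtain ⟨m, hm, hmem, hall⟩ := ih y
      refine ⟨m, hm, List.mem_cons_of_mem _ hmem, ?_⟩
      intro z hz
      rcases List.mem_cons.mp hz with rfl | hz'
      · exact pv_lexle_trans ((pv_lexle_iff z y).mpr (le_of_lt hlt))
          (hall y (List.mem_cons_self ..))
      · exact hall z hz'
    · rw [if_neg (by simpa using hlt)]
      obtain ⟨m, hm, hmem, hall⟩ := ih x
      refine ⟨m, hm, ?_, ?_⟩
      · rcases List.mem_cons.mp hmem with rfl | h
        · exact List.mem_cons_self ..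
        · exact List.mem_cons_of_mem _ (List.mem_cons_of_mem _ h)
      · intro z hz
        rcases List.mem_cons.mp hz with rfl | hz'
        · exact hall _ (List.mem_cons_self ..)
        · rcases List.mem_cons.mp hz' with rfl | hz''
          · exact pv_lexle_trans ((pv_lexle_iff z x).mpr (not_lt.mp hlt))
              (hall x (List.mem_cons_self ..))
          · exact hall z (List.mem_cons_of_mem _ hz'')

theorem pv_min2_spec (xs : List (Int × Int)) (hne : xs ≠ []) :
    ∃ m, PySem.List.min2? xs Prod.fst Prod.snd = some m ∧ m ∈ xs ∧ ∀ y ∈ xs, pvLexLe m y := by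
  obtain ⟨x, t, rfl⟩ : ∃ x t, xs = x :: t := by
    cases xs with
    | nil => cases hne rfl
    | cons x t => exact ⟨x, t, rfl⟩
  rw [pv_min2_eq_foldl, List.foldl_cons]
  exact pv_min2_aux t x

theorem pv_max2_spec (xs : List (Int × Int)) (hne : xs ≠ []) :
    ∃ m, PySem.List.max2? xs Prod.fst Prod.snd = some m ∧ m ∈ xs ∧ ∀ y ∈ xs, pvLexLe y m := by
  obtain ⟨x, t, rfl⟩ : ∃ x t, xs = x :: t := by
    cases xs with
    | nil => cases hne rfl
    | cons x t => exact ⟨x, t, rfl⟩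
  rw [pv_max2_eq_foldl, List.foldl_cons]
  exact pv_max2_aux t x

-- ===== VERDICT (by name: the statement is the Claim_ definition above) =====
theorem merge_intervals_covered_and_span_ns_py_spec : Claim_equal_merge_intervals_covered_and_span_ns_py := by
  intro intervals _
  unfold Spec_merge_intervals_covered_and_span_ns_py
  unfold merge_intervals_covered_and_span_ns_py merge_intervals_covered_and_span_ns_py_alt
  by_cases hnil : intervals = []
  · subst hnil; rfl
  · rw [if_neg hnil]
    rcases hL : PySem.List.sorted2 (intervals.filter (fun p => decide (p.2 > p.1))) Prod.fst Prod.snd with _ | ⟨⟨s0, e0⟩, rest⟩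
    · have hFnil : intervals.filter (fun p => decide (p.2 > p.1)) = [] := by
        have hp := PySem.List.sorted2_perm (intervals.filter (fun p => decide (p.2 > p.1))) Prod.fst Prod.snd false
        rw [hL] at hp
        exact (List.Perm.nil_eq hp).symm
      simp only [hFnil]
      rfl
    · set F := intervals.filter (fun p => decide (p.2 > p.1)) with hFdef
      have hFne : F ≠ [] := by
        intro h
        rw [h] at hL
        have h0 : PySem.List.sorted2 ([] : List (Int × Int)) Prod.fst Prod.snd = [] := rfl
        rw [h0] at hL
        exact absurd hL.symm (List.cons_ne_nil _ _)
      have hLperm : ((s0, e0) :: rest).Perm F := by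
        rw [← hL]; exact PySem.List.sorted2_perm F Prod.fst Prod.snd false
      have hLpair : ((s0, e0) :: rest).Pairwise pvLexLe := by
        have hsp := PySem.List.sorted_pairwise F (fun p => (toLex p : Int ×ₗ Int))
        rw [← pv_sorted2_eq_sorted_lex, hL] at hsp
        exact hsp.imp (fun h => (pv_lexle_iff _ _).mpr h)
      have hFlt : ∀ p ∈ F, p.1 < p.2 := by
        intro p hp
        have := List.mem_filter.mp hp
        simpa using this.2
      have hLlt : ∀ p ∈ (s0, e0) :: rest, p.1 < p.2 := fun p hp => hFlt p (hLperm.subset hp)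
      have hse : s0 < e0 := hLlt (s0, e0) (List.mem_cons_self ..)
      have hA := pv_mergeA rest 0 s0 e0 hse
        (fun p hp => hLlt p (List.mem_cons_of_mem _ hp))
        (fun p hp => pv_fst_le ((List.pairwise_cons.mp hLpair).1 p hp))
        (((List.pairwise_cons.mp hLpair).2).imp pv_fst_le)
      have hUF : Finset.Ico s0 e0 ∪ pvU rest = pvU F := by
        have h1 : Finset.Ico s0 e0 ∪ pvU rest = pvU ((s0, e0) :: rest) := rfl
        rw [h1]
        apply Finset.ext
        intro x
        rw [mem_pvU, mem_pvU]
        exact ⟨fun ⟨p, hp, h⟩ => ⟨p, hLperm.subset hp, h⟩,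
               fun ⟨p, hp, h⟩ => ⟨p, hLperm.mem_iff.mpr hp, h⟩⟩
      have hEpair : (PySem.List.sorted2 (pvEvts F) Prod.fst Prod.snd).Pairwise pvLexLe := by
        have hsp := PySem.List.sorted_pairwise (pvEvts F) (fun p => (toLex p : Int ×ₗ Int))
        rw [← pv_sorted2_eq_sorted_lex] at hsp
        exact hsp.imp (fun h => (pv_lexle_iff _ _).mpr h)
      have hEperm : (PySem.List.sorted2 (pvEvts F) Prod.fst Prod.snd).Perm (pvEvts F) :=
        PySem.List.sorted2_perm (pvEvts F) Prod.fst Prod.snd false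
      have hB := pv_sweep F hFlt (PySem.List.sorted2 (pvEvts F) Prod.fst Prod.snd) [] 0 0 0
        hEpair hEperm (Or.inl ⟨rfl, rfl, rfl⟩)
      obtain ⟨M, hM, hMmem, hMmax⟩ := pv_max2_spec F hFne
      obtain ⟨m, hm, hmmem, hmmin⟩ := pv_min2_spec F hFne
      have hglmem : ((s0, e0) :: rest).getLast (by simp) ∈ (s0, e0) :: rest :=
        List.getLast_mem (by simp)
      have hMeq : M = ((s0, e0) :: rest).getLast (by simp) :=
        pv_lexle_antisymm
          (pv_le_getLast _ (by simp) hLpair M (hLperm.mem_iff.mpr hMmem))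
          (hMmax _ (hLperm.subset hglmem))
      have hmeq : m = (s0, e0) := by
        have hmL : m ∈ (s0, e0) :: rest := hLperm.mem_iff.mpr hmmem
        have h1 : pvLexLe (s0, e0) m := by
          rcases List.mem_cons.mp hmL with rfl | h
          · exact pv_lexle_refl _
          · exact (List.pairwise_cons.mp hLpair).1 _ h
        exact pv_lexle_antisymm (hmmin _ (hLperm.subset (List.mem_cons_self ..))) h1
      have hspan : (0:Int) ≤ (((s0, e0) :: rest).getLast (by simp)).2 - s0 := by
        have h2 := hLlt _ hglmem
        have h1 : s0 ≤ (((s0, e0) :: rest).getLast (by simp)).1 := by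
          have := pv_fst_le (pv_le_getLast _ (by simp) hLpair _ (List.mem_cons_self ..))
          simpa using this
        omega
      simp only [hL, if_neg hFne, hM, hm]
      rw [Prod.mk.injEq]
      constructor
      · rw [hB]
        rw [hA, hUF]
        have : (0:Int) ≤ ((pvU F).card : Int) := Int.natCast_nonneg _
        omega
      · rw [hMeq, hmeq]
        exact max_eq_right hspan
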